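-- pv_equiv track=rewrite | github.com/Semih1997/CodingBat-Java-Problems-in-Python | Codingbat Java Warmup 2/QstingSplosion.py | stringSplosion
-- ===== SOURCE A (Python) =====
-- def stringSplosion(a):
--     if len(a) <= 1:
--         return a
--     elif len(a) > 1 :
--         last = ""
--         for x in range(len(a) + 1):#        a = a[:1] + a[:2] + a[:3] + a
--             last = last + a[:x]
--         return last
-- ===== SOURCE B (Python) =====
-- def stringSplosion(a):
--     parts = []
--     while len(a) > 1:
--         parts.append(a)
--         a = a[:-1]
--     parts.append(a)
--     return ''.join(reversed(parts))
-- ===== Notes on version B (the rewrite author's own statement) =====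
-- stated objective: alternative
-- what changed: Replaces A's forward indexed loop accumulating every prefix a[:x] for x in range(len(a)+1) with a back-to-front peel: a while loop repeatedly drops the last character, collecting the shrinking strings, and joins them in reversed order; no index or prefix slice a[:x] is computed.
import Mathlib
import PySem

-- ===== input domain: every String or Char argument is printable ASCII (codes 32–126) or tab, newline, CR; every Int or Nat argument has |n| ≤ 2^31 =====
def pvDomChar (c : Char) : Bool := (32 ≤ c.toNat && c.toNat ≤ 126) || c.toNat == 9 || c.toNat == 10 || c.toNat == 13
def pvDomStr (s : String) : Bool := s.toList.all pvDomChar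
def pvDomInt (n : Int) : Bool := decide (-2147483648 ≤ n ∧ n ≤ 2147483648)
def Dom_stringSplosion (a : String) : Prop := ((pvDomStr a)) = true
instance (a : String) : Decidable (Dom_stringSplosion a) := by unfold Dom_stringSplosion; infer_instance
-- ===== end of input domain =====

-- B replaces A's forward indexed prefix loop with a back-to-front peel of the last character, joined in reversed order (return value only).

-- ===== PORT A =====
-- A on the character list: the loop 'for x in range(len(a)+1): last = last + a[:x]' as a foldl.
def stringSplosionChars (cs : List Char) : List Char :=
  if cs.length ≤ 1 then cs
  else (PySem.List.pyRange 0 ((cs.length : Int) + 1) 1).foldl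
        (fun last x => last ++ PySem.List.slice cs none (some x)) []

def stringSplosion (a : String) : String := String.ofList (stringSplosionChars a.toList)

-- ===== PORT B =====
-- B's while loop on the character list: a[:-1] is cs.dropLast (exact: PySem.List.slice_to_neg_one).
def stringSplosionAltLoop (cs : List Char) (parts : List (List Char)) : List (List Char) :=
  if 1 < cs.length then stringSplosionAltLoop cs.dropLast (parts ++ [cs])
  else parts ++ [cs]
termination_by cs.length
decreasing_by simp_all [List.length_dropLast]; omega

-- ''.join(reversed(parts)) on lists of characters is reverse-then-flatten.
def stringSplosion_alt (a : String) : String :=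
  String.ofList (stringSplosionAltLoop a.toList []).reverse.flatten

-- ===== PRECONDITION & SPEC =====
def Spec_stringSplosion (a : String) (out : String) : Prop := out = stringSplosion_alt a
instance (a : String) (out : String) : Decidable (Spec_stringSplosion a out) := by unfold Spec_stringSplosion; infer_instance

-- ===== CLAIM (what is proved, stated in full; the proofs are below) =====
def Claim_equal_stringSplosion : Prop := ∀ (a : String), Dom_stringSplosion a → Spec_stringSplosion a (stringSplosion a)

-- ===== LEMMAS AND PROOFS =====
-- The common value: the concatenation of all prefixes cs[:x] for x = 0 .. len(cs).
def splos (cs : List Char) : List Char :=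
  (PySem.List.pyRange 0 ((cs.length : Int) + 1) 1).flatMap
    (fun x => PySem.List.slice cs none (some x))

theorem splos_nil : splos [] = [] := by decide

theorem splos_peel (cs : List Char) (h : cs ≠ []) :
    splos cs = splos cs.dropLast ++ cs := by
  have hn : 1 ≤ cs.length := List.length_pos_of_ne_nil h
  unfold splos
  rw [PySem.List.pyRange_one_succ_right (by exact_mod_cast Int.natCast_nonneg cs.length),
      List.flatMap_append]
  have hlast : List.flatMap (fun x => PySem.List.slice cs none (some x)) [(cs.length : Int)] = cs := by
    simp [PySem.List.slice_to_natCast]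
  rw [hlast]
  congr 1
  have hcast : ((cs.dropLast.length : Int) + 1) = (cs.length : Int) := by
    simp [List.length_dropLast]; omega
  rw [hcast]
  apply List.flatMap_congr
  intro x hx
  obtain ⟨hx0, hx1⟩ := (PySem.List.mem_pyRange_one).1 hx
  have hxn : x = ((x.toNat : Nat) : Int) := by omega
  rw [hxn, PySem.List.slice_to_natCast, PySem.List.slice_to_natCast,
      List.dropLast_eq_take, List.take_take]
  congr 1
  omega

theorem splos_short (cs : List Char) (hle : cs.length ≤ 1) : splos cs = cs := by
  interval_cases h : cs.length
  · rw [List.length_eq_zero_iff.1 h, splos_nil]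
  · have hne : cs ≠ [] := by intro hc; simp [hc] at h
    rw [splos_peel cs hne, List.dropLast_eq_take, h]
    simp [splos_nil]

theorem A_eq_splos (cs : List Char) : stringSplosionChars cs = splos cs := by
  unfold stringSplosionChars
  split
  · rename_i hle
    exact (splos_short cs hle).symm
  · unfold splos
    rw [PySem.List.foldl_append_eq_flatMap]
    simp


theorem B_loop_eq_splos (cs : List Char) (parts : List (List Char)) :
    (stringSplosionAltLoop cs parts).reverse.flatten
      = splos cs ++ parts.reverse.flatten := by
  unfold stringSplosionAltLoop
  split
  · rename_i hgt
    have hne : cs ≠ [] := by intro hc; simp [hc] at hgt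
    rw [B_loop_eq_splos cs.dropLast (parts ++ [cs]), splos_peel cs hne]
    simp
  · rename_i hle
    rw [splos_short cs (by omega)]
    simp
termination_by cs.length
decreasing_by simp_all [List.length_dropLast]; omega

-- ===== VERDICT (by name: the statement is the Claim_ definition above) =====
theorem stringSplosion_spec : Claim_equal_stringSplosion := by
  intro a _
  unfold Spec_stringSplosion stringSplosion stringSplosion_alt
  rw [A_eq_splos, B_loop_eq_splos]
  simp
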